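-- pv_equiv track=rewrite | github.com/Yuanceli/ECE-143 | get_power_of3.py | get_power_of3
-- ===== SOURCE A (Python) =====
-- def get_power_of3(x):
--     '''
--     using the set {1,3,9,27} and the addition and subtraction operations,
--     construct any integer between 1 and 40 without re-using elements.
--
--     :return:a 4-element list of the decomposition
--     '''
--     assert isinstance(x, int), 'Input should be an nonnegative integer'
--     assert 1 <= x <= 40, 'Input should be between 0 and 40'
--     a = [0,0,0,0]
--     for i in range(4):
--         a[i] += x % 3
--         x = x // 3
--         if a[i] == 2:
--             a[i] = -1
--             a[i+1] += 1
--         elif a[i] == 3: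
--             a[i] = 0
--             a[i+1] += 1
--     return a
-- ===== SOURCE B (Python) =====
-- def get_power_of3(x):
--     '''
--     using the set {1,3,9,27} and the addition and subtraction operations,
--     construct any integer between 1 and 40 without re-using elements.
--
--     :return:a 4-element list of the decomposition
--     '''
--     assert isinstance(x, int), 'Input should be an nonnegative integer'
--     assert 1 <= x <= 40, 'Input should be between 0 and 40'
--     return next([d0, d1, d2, d3]
--                 for d3 in (-1, 0, 1)
--                 for d2 in (-1, 0, 1)
--                 for d1 in (-1, 0, 1)
--                 for d0 in (-1, 0, 1)
--                 if d0 + 3*d1 + 9*d2 + 27*d3 == x)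
-- ===== Notes on version B (the rewrite author's own statement) =====
-- stated objective: alternative
-- what changed: B replaces A's digit-by-digit carry-propagating loop with an exhaustive search: it enumerates all 81 sign combinations of {1,3,9,27} and returns the unique combination summing to x (unique by balanced-ternary uniqueness).
import Mathlib
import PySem

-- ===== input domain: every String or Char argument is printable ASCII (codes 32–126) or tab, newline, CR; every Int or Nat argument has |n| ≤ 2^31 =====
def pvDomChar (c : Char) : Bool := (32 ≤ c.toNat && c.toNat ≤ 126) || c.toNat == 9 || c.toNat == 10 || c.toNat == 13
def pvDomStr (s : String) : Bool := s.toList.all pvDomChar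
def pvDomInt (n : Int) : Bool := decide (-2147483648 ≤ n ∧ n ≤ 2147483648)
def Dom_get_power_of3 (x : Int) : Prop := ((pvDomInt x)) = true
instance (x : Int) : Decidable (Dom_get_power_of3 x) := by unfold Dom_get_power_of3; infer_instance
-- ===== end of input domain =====

-- B replaces A's carry-propagating digit loop by an exhaustive search over the 81
-- sign combinations of {1,3,9,27} (alternative algorithm; same cost).

-- ===== PORT A =====
-- one iteration of A's for-loop body: state = (array a, current x), index i
def pvAStep (s : List Int × Int) (i : Nat) : List Int × Int :=
  let a := s.1
  let x := s.2
  let a := a.set i (a.getD i 0 + PySem.Int.mod x 3)   -- a[i] += x % 3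
  let x := PySem.Int.floordiv x 3                     -- x = x // 3
  if a.getD i 0 = 2 then
    let a := a.set i (-1)                             -- a[i] = -1
    (a.set (i+1) (a.getD (i+1) 0 + 1), x)             -- a[i+1] += 1
  else if a.getD i 0 = 3 then
    let a := a.set i 0                                -- a[i] = 0
    (a.set (i+1) (a.getD (i+1) 0 + 1), x)             -- a[i+1] += 1
  else
    (a, x)

def get_power_of3 (x : Int) : List Int :=
  ((List.range 4).foldl pvAStep ([0, 0, 0, 0], x)).1

-- ===== PORT B =====
-- B's generator: all candidate digit lists, outer loop d3, inner loop d0,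
-- filtered by the sum condition; 'next' takes the first one (it always exists
-- on Pre_; head? none corresponds to next's StopIteration).
def pvBCands (x : Int) : List (List Int) :=
  ([-1, 0, 1] : List Int).flatMap (fun d3 =>
    ([-1, 0, 1] : List Int).flatMap (fun d2 =>
      ([-1, 0, 1] : List Int).flatMap (fun d1 =>
        ([-1, 0, 1] : List Int).filterMap (fun d0 =>
          if d0 + 3*d1 + 9*d2 + 27*d3 = x then some [d0, d1, d2, d3] else none))))

def get_power_of3_alt (x : Int) : List Int :=
  (pvBCands x).headD []

-- ===== PRECONDITION & SPEC =====
-- A's asserts raise AssertionError unless 1 <= x <= 40; Pre_ is exactly that.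
def Pre_get_power_of3 (x : Int) : Prop := 1 ≤ x ∧ x ≤ 40
instance (x : Int) : Decidable (Pre_get_power_of3 x) := by unfold Pre_get_power_of3; infer_instance
def pvWitness_get_power_of3 : Int := 17
def Spec_get_power_of3 (x : Int) (out : List Int) : Prop := out = get_power_of3_alt x
instance (x : Int) (out : List Int) : Decidable (Spec_get_power_of3 x out) := by unfold Spec_get_power_of3; infer_instance

-- ===== CLAIM =====
def Claim_equal_get_power_of3 : Prop := ∀ (x : Int), Dom_get_power_of3 x → Pre_get_power_of3 x → Spec_get_power_of3 x (get_power_of3 x)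

-- ===== LEMMAS AND PROOFS =====

-- ===== VERDICT =====
theorem get_power_of3_spec : Claim_equal_get_power_of3 := by
  unfold Claim_equal_get_power_of3
  intro x _ hpre
  obtain ⟨h1, h2⟩ := hpre
  unfold Spec_get_power_of3
  interval_cases x <;> decide
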